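-- pv_equiv track=rewrite | github.com/symonkipkemei/panelization | panelization.tab/takeoff.panel/PanelTakeoff.pushbutton/script.py | get_parts_group
-- ===== SOURCE A (Python) =====
-- def get_parts_group(parts_data):
--     # filter only to external and internal parts:
--     external_part_group = []
--     internal_part_group = []
--     total_part_group = []
--
--     for part in parts_data.values():
--         length = part[0]
--         height = part[1]
--         index = part[2]
--
--         part_type = length + " x " + height
--
--         if index == 1:
--             if part_type not in external_part_group:
--                 external_part_group.append(part_type)
--         elif index == 3:
--             if part_type not in internal_part_group:
--                 internal_part_group.append(part_type)
--         if index == 3 or index == 1: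
--             if part_type not in total_part_group:
--                 total_part_group.append(part_type)
--
--     return external_part_group, internal_part_group, total_part_group
-- ===== SOURCE B (Python) =====
-- def get_parts_group(parts_data):
--     # three staged passes, one per group: a comprehension selects the wanted
--     # indices and dict.fromkeys deduplicates preserving first-appearance order
--     def uniques(wanted):
--         return list(dict.fromkeys(
--             part[0] + " x " + part[1]
--             for part in parts_data.values()
--             if part[2] in wanted
--         ))
--     return uniques((1,)), uniques((3,)), uniques((1, 3))
-- ===== Notes on version B (the rewrite author's own statement) =====
-- stated objective: simpler
-- what changed: B replaces A's single loop with three growing accumulators and inline membership tests by three independent staged passes: one comprehension per group selecting the wanted indices, deduplicated afterwards with dict.fromkeys.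
import Mathlib
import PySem

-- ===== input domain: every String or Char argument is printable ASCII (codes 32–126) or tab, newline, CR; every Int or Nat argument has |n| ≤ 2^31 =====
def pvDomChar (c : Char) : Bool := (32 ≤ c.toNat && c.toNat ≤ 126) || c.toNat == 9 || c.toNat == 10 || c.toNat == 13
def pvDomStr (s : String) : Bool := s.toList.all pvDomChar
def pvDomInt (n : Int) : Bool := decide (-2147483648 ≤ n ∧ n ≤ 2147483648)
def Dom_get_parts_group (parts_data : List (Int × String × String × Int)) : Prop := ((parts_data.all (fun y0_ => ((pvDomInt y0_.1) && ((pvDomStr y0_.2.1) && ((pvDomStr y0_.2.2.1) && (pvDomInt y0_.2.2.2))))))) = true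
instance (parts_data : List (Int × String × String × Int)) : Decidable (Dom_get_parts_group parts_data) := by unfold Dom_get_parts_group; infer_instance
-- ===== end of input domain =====

-- B replaces A's single triple-accumulator loop by three independent staged passes
-- (comprehension per group + dict.fromkeys dedup); objective: simpler decomposition.

-- ===== PORT A =====
-- A's loop over parts_data.values(): dedup-on-insert into the three accumulators.
def pvALoop (vs : List (String × String × Int)) (e i t : List String) :
    List String × List String × List String :=
  match vs with
  | [] => (e, i, t)
  | part :: rest =>
    let part_type := part.1 ++ " x " ++ part.2.1
    let e' := if part.2.2 = 1 then (if part_type ∈ e then e else e ++ [part_type]) else e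
    let i' := if part.2.2 = 1 then i
              else if part.2.2 = 3 then (if part_type ∈ i then i else i ++ [part_type]) else i
    let t' := if part.2.2 = 3 ∨ part.2.2 = 1 then (if part_type ∈ t then t else t ++ [part_type]) else t
    pvALoop rest e' i' t'

def get_parts_group (parts_data : List (Int × String × String × Int)) : List String × List String × List String :=
  pvALoop (PySem.Dict.ofList parts_data).values [] [] []

-- ===== PORT B =====
-- B's helper 'uniques': comprehension (filterMap) over the values, then dedup.
def pvUniques (vs : List (String × String × Int)) (wanted : List Int) : List String :=
  PySem.List.dedup (vs.filterMap (fun part =>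
    if part.2.2 ∈ wanted then some (part.1 ++ " x " ++ part.2.1) else none))

def get_parts_group_alt (parts_data : List (Int × String × String × Int)) : List String × List String × List String :=
  let vs := (PySem.Dict.ofList parts_data).values
  (pvUniques vs [1], pvUniques vs [3], pvUniques vs [1, 3])

-- ===== PRECONDITION & SPEC =====
def Spec_get_parts_group (parts_data : List (Int × String × String × Int)) (out : List String × List String × List String) : Prop := out = get_parts_group_alt parts_data
instance (parts_data : List (Int × String × String × Int)) (out : List String × List String × List String) : Decidable (Spec_get_parts_group parts_data out) := by unfold Spec_get_parts_group; infer_instance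

-- ===== CLAIM (what is proved, stated in full; the proofs are below) =====
def Claim_equal_get_parts_group : Prop := ∀ (parts_data : List (Int × String × String × Int)), Dom_get_parts_group parts_data → Spec_get_parts_group parts_data (get_parts_group parts_data)

-- ===== LEMMAS AND PROOFS =====

theorem pvSet_add_eq (s : List String) (x : String) :
    PySem.Set.add s x = if x ∈ s then s else s ++ [x] := by
  simp [PySem.Set.add, PySem.Set.contains]

-- A's loop computes, for each accumulator, the ordered-set fold of the filtered selection.
theorem pvALoop_eq (vs : List (String × String × Int)) (e i t : List String) :
    pvALoop vs e i t =
      (List.foldl PySem.Set.add e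
        (vs.filterMap (fun p => if p.2.2 ∈ ([1] : List Int) then some (p.1 ++ " x " ++ p.2.1) else none)),
       List.foldl PySem.Set.add i
        (vs.filterMap (fun p => if p.2.2 ∈ ([3] : List Int) then some (p.1 ++ " x " ++ p.2.1) else none)),
       List.foldl PySem.Set.add t
        (vs.filterMap (fun p => if p.2.2 ∈ ([1, 3] : List Int) then some (p.1 ++ " x " ++ p.2.1) else none))) := by
  induction vs generalizing e i t with
  | nil => simp [pvALoop]
  | cons p rest ih =>
    rw [pvALoop, ih]
    by_cases h1 : p.2.2 = 1
    · simp [h1, pvSet_add_eq]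
    · by_cases h3 : p.2.2 = 3
      · simp [h3, pvSet_add_eq]
      · simp [h1, h3]

-- ===== VERDICT (by name: the statement is the Claim_ definition above) =====
theorem get_parts_group_spec : Claim_equal_get_parts_group := by
  intro parts_data _
  unfold Spec_get_parts_group get_parts_group get_parts_group_alt pvUniques
  rw [pvALoop_eq]
  simp only [PySem.List.dedup_eq_ofList, PySem.Set.ofList_eq_foldl]
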